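/-
  THE CONTRACTS OF THE ARENA ALLOCATOR AND OF THE DECODER OBJECT'S LIFETIME (c/stb_vorbis_fixed.c; design/CONTRACTS.md entries 11,
  13, 14, 15, 37, 39, 45, 54, 73, 74, 75, 82, 88, 92): `Spec`s over the shadow layer (Asan/Stack.lean), the arena layer
  (Vorbis/Arena.lean, Vorbis/ArenaShadow.lean) and, for `vorbis_deinit` / `stb_vorbis_close`, `DeinitOK` (Vorbis/State/Deinit.lean).

  GHOST PARAMETERS. Every Spec starts with `others frames` (the live objects of the shadow invariant). The allocator Specs add the
  arena ghost `A : Arena` (and the blocks a release removes); `vorbis_deinit` / `stb_vorbis_close` add the block predicate `Blk`.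

  CONVENTIONS OF THIS FILE
    f                      the decoder object, `(u.reg .rdi).toNat` (`&p` of stb_vorbis_open_memory, or the arena copy)
    a C `int` argument     is read UNSIGNED: `(u.reg .rsi).toNat % 2 ^ 32`. For a size this needs no case split on the sign:
                           `A.Fits n` is false for every `n ≥ 2^31` ("negative") and for every `n > INT_MAX − 7`, exactly the
                           requests FIX A's first test (`cmp esi, 0x7ffffff8 ; ja`) refuses (`Arena.not_fits_of_big`)
    ObjLive others frames f        OB1 at the shadow level: every byte of the 1808 bytes of `*f` is live. BYTEWISE (`Block.live`), so
                           that both kinds of caller can supply it: `ObjLive.of_liveIn` (the pilot's `LiveIn`: inside ONE object)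
                           and `ObjLive.of_ob1` (the invariant's `OB1 Blk f` + `BlkLive Blk Live`). `ObjLive.site` is the check
                           site inside `*f`, `ObjLive.where_` the arithmetic a walk needs (off the text, off the function's stack)
    ArenaPre A others frames u     the common precondition of the allocator Specs: `ShadowPre`, `ObjLive`, `ArenaOK A others u.mem f`,
                           and `L.textHi ≤ A.B` (the arena lies above the image's text: every caller carries it from the start
                           file, B = 800000H; it is what makes a NEW block satisfy `ShadowPre.offText`: `ArenaPre.offText_setup`)
    top                    the shadow clause of every post is stated at `(u.reg .rsp).toNat + 8`: the SAME `top` as the pre's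

      function              own frame                 callees (largest frame)                                   frame
      setup_malloc          6 pushes + sub 8 = 56     load8 / load4 (16), arena_unpoison (0), malloc (0)        56 + 8 + 16 = 80
      setup_temp_malloc     6 pushes + sub 8 = 56     the same                                                  80
      setup_temp_free       3 pushes = 24             load8 / load4 (16), arena_poison (0), free (0)            24 + 8 + 16 = 48
      arena_temp_restore    4 pushes + sub 8 = 40     load8 / load4 / store4 (16), arena_poison (0)             40 + 8 + 16 = 64
      setup_free            2 pushes + sub 8 = 24     load8 (16), free (0)                                      24 + 8 + 16 = 48
      make_block_array      6 pushes + sub 8 = 56     store8 (16)                                               80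
      vorbis_alloc          sub 8                     setup_malloc (80)                                         8 + 8 + 80 = 96
      vorbis_init           2 pushes + sub 8 = 24     memset (64), the checks (16)                              24 + 8 + 64 = 96
      vorbis_deinit         5 pushes = 40             setup_free (48), the checks (16)                          40 + 8 + 48 = 96
      stb_vorbis_close      1 push = 8                vorbis_deinit (96), setup_free (48)                       8 + 8 + 96 = 112
      stb_vorbis_get_error  1 push = 8                load4 (16)                                                8 + 8 + 16 = 32
      stb_vorbis_get_file_offset   2 pushes + sub 8   load8 (16)                                                48
      vorbis_validate       sub 8                     memcmp (80)                                               8 + 8 + 80 = 96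
      crc32_init            3 pushes = 24             store4 (16)                                               48

  FINDINGS about design/CONTRACTS.md and the shared predicate files are in the doc comments, marked FINDING.
-/
import Vorbis.Spec.Basic
import Vorbis.Spec.Common
import Vorbis.ArenaShadow
import Vorbis.State.Deinit
namespace Vorbis.Spec
open X86 X86.User Asan

/-- **The common precondition of the allocator functions** (CONTRACTS 37, 39, 74, 75, 88: "OB1, ArenaOK A m f" + the implicit
shadow clause): the shadow layer, `*f` live, the arena layer for the ghost `A`, and the arena above the image's text. -/
structure ArenaPre (A : Arena) (others : List Obj) (frames : List (Nat × FrameLayout)) (u : State) : Prop where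
  /-- the shadow clause -/
  shadow : ShadowPre others frames u
  /-- OB1 -/
  obj : ObjLive others frames (u.reg .rdi).toNat
  /-- AR1 – AR6 -/
  arena : ArenaOK A others u.mem (u.reg .rdi).toNat
  /-- the arena lies above the image's text (start file: B = 800000H) -/
  offText : L.textHi ≤ A.B

/-! ### `setup_malloc`, `vorbis_alloc`, `setup_temp_malloc` -/

/-- **`setup_malloc(rdi = f, esi = sz)`** (CONTRACTS 74: "OB1, AR1–AR7 (ArenaOK A m f). No condition on sz: the function is
TOTAL. Succeeds iff `0 ≤ sz ∧ S + 32 + r8 sz ≤ T`. Success: returns `p = B + S + 32 ≠ 0`; `S' = S + 32 + r8 sz`;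
`setups' = setups ++ [(S+32, sz)]`; `Covers m' (p, sz)`; shadow changed only on `span (p,sz)`; ArenaOK again. Failure: returns 0;
arena state and shadow unchanged"). With `n` = `sz` read unsigned the success condition is `A.Fits n` alone. Success: rax is the
new block, the arena ghost is `A.pushSetup n`, the new block is one more live object. Failure: rax = 0, the arena and the shadow
are as they were. Footprint: `setup_memory_required` (`[f + 8, f + 12)`: `+= r8 sz`, also on the failure path of the exact-fit
test; its value is in no contract), `setup_offset` (`[f + 128, f + 132)`), the shadow of the new block, 80 bytes of stack.

THE FOOTPRINT OF A FAILED CALL (last conjunct of the failure clause; farm PROBLEM CONTRACT-POST of units start_decoder.5 / .6,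
freeze-9): a refused request wrote NOTHING but the 80 bytes of stack and `setup_memory_required` — `arena_unpoison` is called on
the success path only, `setup_offset` is stored on the success path only. The third window of `writes` is stated for every `n`,
and for a refused `n` (stream data: up to 7FFFFFFFH) it reaches far beyond the shadow region `[C00000H, E00000H)` that
`ShadowUntouched` speaks of, into memory that is in no window of any caller: without this conjunct a caller could not
re-establish its own `SameExcept` after a failed allocation. A caller uses it by `.mono` into its own windows.

FINDING (shared file Vorbis/Blocks.lean): `ObjSame f mem mem'` ("what EVERY allocator call leaves of `*f`", windows `(0, 128)`,
`(136, 1808)`) is FALSE after this function: it stores to `[f + 8, f + 12)`. What holds is `ObjEq allocWins` (below). -/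
def setup_malloc.spec (others : List Obj) (frames : List (Nat × FrameLayout)) (A : Arena) : Spec where
  pre u := ArenaPre A others frames u
  post u v :=
    (A.Fits ((u.reg .rsi).toNat % 2 ^ 32) →
      (v.reg .rax).toNat = A.B + A.S + 32 ∧
      ArenaOK (A.pushSetup ((u.reg .rsi).toNat % 2 ^ 32)) (A.newSetupObj ((u.reg .rsi).toNat % 2 ^ 32) :: others) v.mem
        (u.reg .rdi).toNat ∧
      ShadowInv (A.newSetupObj ((u.reg .rsi).toNat % 2 ^ 32) :: others) frames ((u.reg .rsp).toNat + 8) v.mem) ∧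
    (¬ A.Fits ((u.reg .rsi).toNat % 2 ^ 32) →
      v.reg .rax = 0 ∧
      ArenaOK A others v.mem (u.reg .rdi).toNat ∧
      ShadowUntouched u.mem v.mem ∧
      Mem.SameExcept
        [⟨(u.reg .rsp).toNat - 80, (u.reg .rsp).toNat⟩, ⟨(u.reg .rdi).toNat + 8, (u.reg .rdi).toNat + 12⟩] u.mem v.mem)
  frame := 80
  writes u :=
    [⟨(u.reg .rdi).toNat + 8, (u.reg .rdi).toNat + 12⟩,
     ⟨(u.reg .rdi).toNat + 128, (u.reg .rdi).toNat + 132⟩,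
     shadowSpan (A.B + A.S + 32) (A.B + A.S + 32 + (u.reg .rsi).toNat % 2 ^ 32)]

@[vspec] theorem setup_malloc.spec_frame (others : List Obj) (frames : List (Nat × FrameLayout)) (A : Arena) :
    (setup_malloc.spec others frames A).frame = 80 := id rfl

@[vspec] theorem setup_malloc.spec_writes (others : List Obj) (frames : List (Nat × FrameLayout)) (A : Arena) (u : State) :
    (setup_malloc.spec others frames A).writes u =
      [⟨(u.reg .rdi).toNat + 8, (u.reg .rdi).toNat + 12⟩,
       ⟨(u.reg .rdi).toNat + 128, (u.reg .rdi).toNat + 132⟩,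
       shadowSpan (A.B + A.S + 32) (A.B + A.S + 32 + (u.reg .rsi).toNat % 2 ^ 32)] := id rfl

/-- **`vorbis_alloc(rdi = f)`** (CONTRACTS 75: "`= setup_malloc(f, 1808)`. Under SD.12: returns `f' = B + S + 32 ≠ 0`,
`Covers (f',1808)`, `S' = S + 1840`. Without SD.12: NULL or the block (total)"): `setup_malloc`'s contract at `n = 1808`
(`sub rsp, 8 ; mov esi, 0x710 ; call setup_malloc`). That it succeeds at its call site is `ArenaOK.vorbis_alloc_fits`; ADO
afterwards is `ADO.of_vorbis_alloc`. -/
def vorbis_alloc.spec (others : List Obj) (frames : List (Nat × FrameLayout)) (A : Arena) : Spec where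
  pre u := ArenaPre A others frames u
  post u v :=
    (A.Fits Off.sizeof.stb_vorbis →
      (v.reg .rax).toNat = A.B + A.S + 32 ∧
      ArenaOK (A.pushSetup Off.sizeof.stb_vorbis) (A.newSetupObj Off.sizeof.stb_vorbis :: others) v.mem (u.reg .rdi).toNat ∧
      ShadowInv (A.newSetupObj Off.sizeof.stb_vorbis :: others) frames ((u.reg .rsp).toNat + 8) v.mem) ∧
    (¬ A.Fits Off.sizeof.stb_vorbis →
      v.reg .rax = 0 ∧
      ArenaOK A others v.mem (u.reg .rdi).toNat ∧
      ShadowUntouched u.mem v.mem)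
  frame := 96
  writes u :=
    [⟨(u.reg .rdi).toNat + 8, (u.reg .rdi).toNat + 12⟩,
     ⟨(u.reg .rdi).toNat + 128, (u.reg .rdi).toNat + 132⟩,
     shadowSpan (A.B + A.S + 32) (A.B + A.S + 32 + Off.sizeof.stb_vorbis)]

@[vspec] theorem vorbis_alloc.spec_frame (others : List Obj) (frames : List (Nat × FrameLayout)) (A : Arena) :
    (vorbis_alloc.spec others frames A).frame = 96 := id rfl

@[vspec] theorem vorbis_alloc.spec_writes (others : List Obj) (frames : List (Nat × FrameLayout)) (A : Arena) (u : State) :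
    (vorbis_alloc.spec others frames A).writes u =
      [⟨(u.reg .rdi).toNat + 8, (u.reg .rdi).toNat + 12⟩,
       ⟨(u.reg .rdi).toNat + 128, (u.reg .rdi).toNat + 132⟩,
       shadowSpan (A.B + A.S + 32) (A.B + A.S + 32 + Off.sizeof.stb_vorbis)] := id rfl

/-- **`setup_temp_malloc(rdi = f, esi = sz)`** (CONTRACTS 37: "OB1, ArenaOK A m f. Succeeds iff `0 ≤ sz ∧ T − r8 sz − 32 ≥ S`.
Success: returns `p = B + T' ≠ 0`, `T' = T − r8 sz − 32`; `temps' = (T', sz) :: temps`; `Covers m' (p, sz)`; shadow changed only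
on `span (p,sz)`; ArenaOK. Failure: returns 0, nothing changed"). The success condition is `A.Fits n` again
(`Arena.fits_iff_compiled`: the compiled test `T − r8 sz − 31 ≤ S → NULL` is its negation); `temp_alloc_ok`: under ADO a request
with `r8 n ≤ tmr` fits. Footprint: `temp_offset` (`[f + 132, f + 136)`), the shadow of the new block, 80 bytes of stack.

THE FOOTPRINT OF A FAILED CALL (last conjunct of the failure clause, as for `setup_malloc`; freeze-9): a refused request wrote
NOTHING but the 80 bytes of stack (`temp_offset` is stored and `arena_unpoison` is called on the success path only), whereas the
shadow window of `writes` is stated for every `n` and, for a refused `n`, does not stay inside the arena's shadow. -/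
def setup_temp_malloc.spec (others : List Obj) (frames : List (Nat × FrameLayout)) (A : Arena) : Spec where
  pre u := ArenaPre A others frames u
  post u v :=
    (A.Fits ((u.reg .rsi).toNat % 2 ^ 32) →
      (v.reg .rax).toNat = A.B + (A.T - (r8 ((u.reg .rsi).toNat % 2 ^ 32) + 32)) ∧
      ArenaOK (A.pushTemp ((u.reg .rsi).toNat % 2 ^ 32)) (A.newTempObj ((u.reg .rsi).toNat % 2 ^ 32) :: others) v.mem
        (u.reg .rdi).toNat ∧
      ShadowInv (A.newTempObj ((u.reg .rsi).toNat % 2 ^ 32) :: others) frames ((u.reg .rsp).toNat + 8) v.mem) ∧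
    (¬ A.Fits ((u.reg .rsi).toNat % 2 ^ 32) →
      v.reg .rax = 0 ∧
      ArenaOK A others v.mem (u.reg .rdi).toNat ∧
      ShadowUntouched u.mem v.mem ∧
      Mem.SameExcept [⟨(u.reg .rsp).toNat - 80, (u.reg .rsp).toNat⟩] u.mem v.mem)
  frame := 80
  writes u :=
    [⟨(u.reg .rdi).toNat + 132, (u.reg .rdi).toNat + 136⟩,
     shadowSpan (A.B + (A.T - (r8 ((u.reg .rsi).toNat % 2 ^ 32) + 32)))
       (A.B + (A.T - (r8 ((u.reg .rsi).toNat % 2 ^ 32) + 32)) + (u.reg .rsi).toNat % 2 ^ 32)]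

@[vspec] theorem setup_temp_malloc.spec_frame (others : List Obj) (frames : List (Nat × FrameLayout)) (A : Arena) :
    (setup_temp_malloc.spec others frames A).frame = 80 := id rfl

@[vspec] theorem setup_temp_malloc.spec_writes (others : List Obj) (frames : List (Nat × FrameLayout)) (A : Arena)
    (u : State) :
    (setup_temp_malloc.spec others frames A).writes u =
      [⟨(u.reg .rdi).toNat + 132, (u.reg .rdi).toNat + 136⟩,
       shadowSpan (A.B + (A.T - (r8 ((u.reg .rsi).toNat % 2 ^ 32) + 32)))
         (A.B + (A.T - (r8 ((u.reg .rsi).toNat % 2 ^ 32) + 32)) + (u.reg .rsi).toNat % 2 ^ 32)] := id rfl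

/-! ### `setup_temp_free`: the machine-level contract (CONTRACTS' "weak spec") and the LIFO contract -/

/-- **`setup_temp_free(rdi = f, rsi = p, edx = sz)`, THE MACHINE-LEVEL CONTRACT** (CONTRACTS 88, row `weak spec`: "pre OB1,
`mem64[f+112] ≠ 0`, `p % 8 = 0`, `p + r8 sz ≤ 0xC00000`, `0 ≤ sz`; post returns, two checked loads of `*f`, granules of
`[p, p + r8 sz)` set to FA (none for sz = 0), `[f+132] += r8 sz + 32`, nothing else written, no report. AR2–AR4 are LOST: usable
only where the successor is SD.ERR"). No arena ghost. It is the contract the UNIT `setup_temp_free` proves by walking the code;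
the LIFO contract `setup_temp_free.spec` follows from it (`setup_temp_free.calls_of_weak`), and the one call
`setup_temp_free(f, values, 0)` of start_decoder after a failed compute_codewords (C's finding 10: it violates `r8 sz = r8 m`)
uses it directly (`sz = 0`: `setup_temp_free.weak_zero` — no shadow byte changes).
`p = 0`: no effect at all (ARENA-FIX 2). `p ≠ 0` (`n` = `sz` read unsigned; `p + r8 n ≤ C00000H` makes `n < 2^31`): the shadow
afterwards is that of `poisonMem m2 p (r8 n)` for a memory `m2` (the memory at the call of `arena_poison`) whose shadow is the
entry state's; `temp_offset` has grown by `r8 n + 32` (mod 2^32). Footprint: `temp_offset`, those shadow bytes, 48 bytes of stack.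
LAST CLAUSE OF THE PRE (farm PROBLEM CONTRACT-PRE of unit setup_temp_free, freeze-5): the poisoned bytes `[p, p + r8 sz)` do not meet
`temp_offset` `[f + 132, f + 136)`, or there are none (`p = 0`, `sz = 0`): the function poisons them and THEN loads `f->temp_offset`
through a check (0x10b139). -/
def setup_temp_free.weakSpec (others : List Obj) (frames : List (Nat × FrameLayout)) : Spec where
  pre u :=
    ShadowPre others frames u ∧
    ObjLive others frames (u.reg .rdi).toNat ∧
    stb_vorbis.alloc.alloc_buffer u.mem (u.reg .rdi).toNat ≠ 0 ∧
    (u.reg .rsi = 0 ∨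
      ((u.reg .rsi).toNat % 8 = 0 ∧ 0x100000 ≤ (u.reg .rsi).toNat ∧
       (u.reg .rsi).toNat + r8 ((u.reg .rdx).toNat % 2 ^ 32) ≤ 0xC00000)) ∧
    (u.reg .rsi = 0 ∨ r8 ((u.reg .rdx).toNat % 2 ^ 32) = 0 ∨
      (u.reg .rsi).toNat + r8 ((u.reg .rdx).toNat % 2 ^ 32) ≤ (u.reg .rdi).toNat + 132 ∨
      (u.reg .rdi).toNat + 136 ≤ (u.reg .rsi).toNat)
  post u v :=
    (u.reg .rsi = 0 →
      ShadowUntouched u.mem v.mem ∧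
      v.mem.readLE (u.reg .rdi + 132) 4 = u.mem.readLE (u.reg .rdi + 132) 4) ∧
    (u.reg .rsi ≠ 0 →
      (∃ m2 : Mem, ShadowUntouched u.mem m2 ∧
        ShadowUntouched (poisonMem m2 (u.reg .rsi).toNat (r8 ((u.reg .rdx).toNat % 2 ^ 32))) v.mem) ∧
      v.mem.readLE (u.reg .rdi + 132) 4 =
        (u.mem.readLE (u.reg .rdi + 132) 4 + r8 ((u.reg .rdx).toNat % 2 ^ 32) + 32) % 2 ^ 32)
  frame := 48
  writes u :=
    [⟨(u.reg .rdi).toNat + 132, (u.reg .rdi).toNat + 136⟩,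
     shadowSpan (u.reg .rsi).toNat ((u.reg .rsi).toNat + r8 ((u.reg .rdx).toNat % 2 ^ 32))]

@[vspec] theorem setup_temp_free.weakSpec_frame (others : List Obj) (frames : List (Nat × FrameLayout)) :
    (setup_temp_free.weakSpec others frames).frame = 48 := id rfl

@[vspec] theorem setup_temp_free.weakSpec_writes (others : List Obj) (frames : List (Nat × FrameLayout)) (u : State) :
    (setup_temp_free.weakSpec others frames).writes u =
      [⟨(u.reg .rdi).toNat + 132, (u.reg .rdi).toNat + 136⟩,
       shadowSpan (u.reg .rsi).toNat ((u.reg .rsi).toNat + r8 ((u.reg .rdx).toNat % 2 ^ 32))] := id rfl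

/-- **`setup_temp_free(rdi = f, rsi = p, edx = sz)`, THE LIFO CONTRACT** (CONTRACTS 88: "OB1, ArenaOK. Either `p = 0` (then
nothing else), or `temps = (t,m) :: rest ∧ p = B + t ∧ r8 sz = r8 m ∧ 0 ≤ sz` (release of the TOP temp block with the size it was
allocated with). `p = 0`: no effect (ARENA-FIX 2). `p ≠ 0`: `T' = T + r8 sz + 32`, `temps' = rest`, granules of `[p, p + r8 sz)`
are FA, nothing else; ArenaOK"). Ghosts: the top block's size `m` and the blocks below it `rest` (`t = T`: `ArenaOK.top_eq_T`).
`n` = `sz` read unsigned (`r8 n = r8 m` makes it small). The released block leaves the live list. LAST CLAUSE of the `p ≠ 0` case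
(the same farm PROBLEM): `*f` does not meet the released block and its red zone `[B + T, B + T + r8 m + 32)`; a caller has it in one
line: `setup_temp_free.apart_of_block` (`*f` a setup block), `.apart_of_out` (`*f` outside the arena's buffer: `HandOK.objOut`). -/
def setup_temp_free.spec (others : List Obj) (frames : List (Nat × FrameLayout)) (A : Arena) (m : Nat)
    (rest : List (Nat × Nat)) : Spec where
  pre u :=
    ArenaPre A others frames u ∧
    (u.reg .rsi = 0 ∨
      (A.temps = (A.T, m) :: rest ∧ (u.reg .rsi).toNat = A.B + A.T ∧ r8 ((u.reg .rdx).toNat % 2 ^ 32) = r8 m ∧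
        ((u.reg .rdi).toNat + 1808 ≤ A.B + A.T ∨ A.B + A.T + r8 m + 32 ≤ (u.reg .rdi).toNat)))
  post u v :=
    (u.reg .rsi = 0 →
      ArenaOK A others v.mem (u.reg .rdi).toNat ∧
      ShadowUntouched u.mem v.mem) ∧
    (u.reg .rsi ≠ 0 →
      ArenaOK (A.withTemp (A.T + r8 ((u.reg .rdx).toNat % 2 ^ 32) + 32) rest) (dropObjs [A.tempObj (A.T, m)] others) v.mem
        (u.reg .rdi).toNat ∧
      ShadowInv (dropObjs [A.tempObj (A.T, m)] others) frames ((u.reg .rsp).toNat + 8) v.mem)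
  frame := 48
  writes u :=
    [⟨(u.reg .rdi).toNat + 132, (u.reg .rdi).toNat + 136⟩,
     shadowSpan (u.reg .rsi).toNat ((u.reg .rsi).toNat + r8 ((u.reg .rdx).toNat % 2 ^ 32))]

@[vspec] theorem setup_temp_free.spec_frame (others : List Obj) (frames : List (Nat × FrameLayout)) (A : Arena) (m : Nat)
    (rest : List (Nat × Nat)) : (setup_temp_free.spec others frames A m rest).frame = 48 := id rfl

@[vspec] theorem setup_temp_free.spec_writes (others : List Obj) (frames : List (Nat × FrameLayout)) (A : Arena) (m : Nat)
    (rest : List (Nat × Nat)) (u : State) :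
    (setup_temp_free.spec others frames A m rest).writes u =
      [⟨(u.reg .rdi).toNat + 132, (u.reg .rdi).toNat + 136⟩,
       shadowSpan (u.reg .rsi).toNat ((u.reg .rsi).toNat + r8 ((u.reg .rdx).toNat % 2 ^ 32))] := id rfl

/-! ### `arena_temp_restore`, `setup_free` -/

/-- **`arena_temp_restore(rdi = f, esi = p)`** (= `temp_alloc_restore`; CONTRACTS 39: "OB1, ArenaOK, `T ≤ p ≤ L`, p a cut point
of the temp stack (`p = L` or `p = t_i` for a block of temps). `T' = p`; `temps'` = the blocks with offset ≥ p; granules of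
`[B+T, B+p)` are FA (the released blocks and their red zones); ArenaOK; with `p = L`: ADO again if it held at the caller's
entry"). Ghosts: the released blocks `dead` and the others `keep` (`A.temps = dead ++ keep`, the dead ones end exactly at `p`:
`TempChain A.T dead p`; `p = L`: `ArenaOK.cut_all`). `p` is read unsigned (`p ≤ L < 2^31`). ADO again: `ADOBusy.restore`.
LAST CLAUSE (farm PROBLEM CONTRACT-PRE of unit arena_temp_restore, freeze-5): `*f` DOES NOT MEET THE RELEASED RANGE `[B + T, B + p)`.
The function poisons that range and THEN stores `f->temp_offset` through a check (0x10916d): bytewise `ObjLive` allows `*f` inside a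
dead temp block, where the check would fire (the worker's counter-state). A caller has it in one line: `*f` is a setup block
(`arena_temp_restore.apart_of_block`), lies in the stack region (`.apart_of_stack`) or outside the arena's buffer (`.apart_of_out`).
Footprint: `temp_offset`, the shadow of `[B + T, B + p)`, 64 bytes of stack. -/
def arena_temp_restore.spec (others : List Obj) (frames : List (Nat × FrameLayout)) (A : Arena)
    (dead keep : List (Nat × Nat)) : Spec where
  pre u :=
    ArenaPre A others frames u ∧
    A.temps = dead ++ keep ∧
    TempChain A.T dead ((u.reg .rsi).toNat % 2 ^ 32) ∧
    ((u.reg .rdi).toNat + 1808 ≤ A.B + A.T ∨ A.B + (u.reg .rsi).toNat % 2 ^ 32 ≤ (u.reg .rdi).toNat)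
  post u v :=
    ArenaOK (A.withTemp ((u.reg .rsi).toNat % 2 ^ 32) keep) (dropObjs (dead.map A.tempObj) others) v.mem (u.reg .rdi).toNat ∧
    ShadowInv (dropObjs (dead.map A.tempObj) others) frames ((u.reg .rsp).toNat + 8) v.mem
  frame := 64
  writes u :=
    [⟨(u.reg .rdi).toNat + 132, (u.reg .rdi).toNat + 136⟩,
     shadowSpan (A.B + A.T) (A.B + A.T + ((u.reg .rsi).toNat % 2 ^ 32 - A.T))]

@[vspec] theorem arena_temp_restore.spec_frame (others : List Obj) (frames : List (Nat × FrameLayout)) (A : Arena)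
    (dead keep : List (Nat × Nat)) : (arena_temp_restore.spec others frames A dead keep).frame = 64 := id rfl

@[vspec] theorem arena_temp_restore.spec_writes (others : List Obj) (frames : List (Nat × FrameLayout)) (A : Arena)
    (dead keep : List (Nat × Nat)) (u : State) :
    (arena_temp_restore.spec others frames A dead keep).writes u =
      [⟨(u.reg .rdi).toNat + 132, (u.reg .rdi).toNat + 136⟩,
       shadowSpan (A.B + A.T) (A.B + A.T + ((u.reg .rsi).toNat % 2 ^ 32 - A.T))] := id rfl

/-! ### `*f` does not meet what a release poisons: the last clause of the two releasing contracts, for the callers -/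

/-- **A caller whose `*f` is a setup block** (the arena copy: inverse_mdct.12, decode_residue.11; `DecodeInv.obj`) has the last
clause of `arena_temp_restore.spec.pre`: a setup block ends at or below `B + S ≤ B + T`. (From the farm worker's Lemmas.lean.) -/
theorem arena_temp_restore.apart_of_block {A : Arena} {others : List Obj} {mem : Mem} {f : Nat} (hA : ArenaOK A others mem f)
    {g : Nat} (hb : A.Block g 1808) (p : Nat) : g + 1808 ≤ A.B + A.T ∨ A.B + p ≤ g := by
  have hr := hA.block_range hb
  have h2 := hA.AR2
  have hle := le_r8 1808
  left
  omega

/-- **A caller whose `*f` lies in the stack region** (`&p` of stb_vorbis_open_memory) has it: the arena does not meet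
`[700000H, 800000H)` (AR1x). (From the farm worker's Lemmas.lean.) -/
theorem arena_temp_restore.apart_of_stack {A : Arena} {others : List Obj} {mem : Mem} {f : Nat} (hA : ArenaOK A others mem f)
    {g : Nat} (h1 : 0x700000 ≤ g) (h2 : g + 1808 ≤ 0x800000) {p : Nat} (hp : p ≤ A.L) :
    g + 1808 ≤ A.B + A.T ∨ A.B + p ≤ g := by
  have h1x := hA.AR1x
  omega

/-- **A caller whose `*f` lies outside the arena's buffer** (`StartDecoder.HandOK.objOut`) has it, for a cut point `p ≤ L`. -/
theorem arena_temp_restore.apart_of_out {A : Arena} {g : Nat} (hout : g + 1808 ≤ A.B ∨ A.B + A.L ≤ g) {p : Nat}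
    (hp : p ≤ A.L) : g + 1808 ≤ A.B + A.T ∨ A.B + p ≤ g := by
  omega

/-- **A caller whose `*f` is a setup block** has the last clause of `setup_temp_free.spec.pre` (the `p ≠ 0` case). -/
theorem setup_temp_free.apart_of_block {A : Arena} {others : List Obj} {mem : Mem} {f : Nat} (hA : ArenaOK A others mem f)
    {g : Nat} (hb : A.Block g 1808) (m : Nat) : g + 1808 ≤ A.B + A.T ∨ A.B + A.T + r8 m + 32 ≤ g := by
  have hr := hA.block_range hb
  have h2 := hA.AR2
  have hle := le_r8 1808
  left
  omega

/-- **A caller whose `*f` lies outside the arena's buffer** (start_decoder: `StartDecoder.HandOK.objOut`) has the last clause of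
`setup_temp_free.spec.pre`: the top temp block and its red zone end at or below `B + L` (`ht`: the block IS the top one). -/
theorem setup_temp_free.apart_of_out {A : Arena} {others : List Obj} {mem : Mem} {f : Nat} (hA : ArenaOK A others mem f)
    {m : Nat} {rest : List (Nat × Nat)} (ht : A.temps = (A.T, m) :: rest) {g : Nat}
    (hout : g + 1808 ≤ A.B ∨ A.B + A.L ≤ g) : g + 1808 ≤ A.B + A.T ∨ A.B + A.T + r8 m + 32 ≤ g := by
  have h4 := hA.AR4
  rw [ht] at h4
  simp only [TempChain] at h4
  have hle : A.T + r8 m + 32 ≤ A.L := h4.2.le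
  omega

/-- **`setup_free(rdi = f, rsi = q)`** (CONTRACTS 11: "OB1. (`mem64[f+112] ≠ 0` makes the `free` arm dead; `free` is a bare
`ret`, so safety does not depend on it). No effect"): `q` is ANY value, never dereferenced. One checked load of `f + 112`; with
`alloc_buffer ≠ 0` it returns at once, otherwise after `free` (a bare `ret`: its contract is a hypothesis of the unit).
Nothing is written but 48 bytes of stack; no shadow byte is written. -/
def setup_free.spec (others : List Obj) (frames : List (Nat × FrameLayout)) : Spec where
  pre u :=
    ShadowPre others frames u ∧
    ObjLive others frames (u.reg .rdi).toNat
  post u v :=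
    ShadowUntouched u.mem v.mem
  frame := 48
  writes _ := []

@[vspec] theorem setup_free.spec_frame (others : List Obj) (frames : List (Nat × FrameLayout)) :
    (setup_free.spec others frames).frame = 48 := id rfl

@[vspec] theorem setup_free.spec_writes (others : List Obj) (frames : List (Nat × FrameLayout)) (u : State) :
    (setup_free.spec others frames).writes u = [] := id rfl

/-! ### `make_block_array` -/

/-- **`make_block_array(rdi = mem, esi = count, edx = size)`** (CONTRACTS 54: "Block(mem, N) with N ≥ 8·count; 0 ≤ count,
0 ≤ size. rax = mem; ∀ i < count: mem64[mem + 8i] = mem + 8·count + i·sext(size). Nothing else changed"): `count` and `size` are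
non-negative `int`s (below 2^31 read unsigned); `count = 0`, or the `8·count` bytes at `mem` lie inside one live object.
Returns `mem`; the pointer table is filled; nothing else is written but its own 80 bytes of stack; no shadow byte is written.
(CONTRACTS' `count·(8+size) < 2^31` is the CALLER's bound on its allocation request; this function does not need it: no 64-bit
address here can wrap.) -/
def make_block_array.spec (others : List Obj) (frames : List (Nat × FrameLayout)) : Spec where
  pre u :=
    ShadowPre others frames u ∧
    (u.reg .rsi).toNat % 2 ^ 32 < 2 ^ 31 ∧
    (u.reg .rdx).toNat % 2 ^ 32 < 2 ^ 31 ∧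
    ((u.reg .rsi).toNat % 2 ^ 32 = 0 ∨
      LiveIn others frames (u.reg .rdi).toNat (8 * ((u.reg .rsi).toNat % 2 ^ 32)))
  post u v :=
    v.reg .rax = u.reg .rdi ∧
    ShadowUntouched u.mem v.mem ∧
    ∀ i, i < (u.reg .rsi).toNat % 2 ^ 32 →
      v.mem.readLE (u.reg .rdi + UInt64.ofNat (8 * i)) 8 =
        (u.reg .rdi).toNat + 8 * ((u.reg .rsi).toNat % 2 ^ 32) + i * ((u.reg .rdx).toNat % 2 ^ 32)
  frame := 80
  writes u := [⟨(u.reg .rdi).toNat, (u.reg .rdi).toNat + 8 * ((u.reg .rsi).toNat % 2 ^ 32)⟩]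

@[vspec] theorem make_block_array.spec_frame (others : List Obj) (frames : List (Nat × FrameLayout)) :
    (make_block_array.spec others frames).frame = 80 := id rfl

@[vspec] theorem make_block_array.spec_writes (others : List Obj) (frames : List (Nat × FrameLayout)) (u : State) :
    (make_block_array.spec others frames).writes u =
      [⟨(u.reg .rdi).toNat, (u.reg .rdi).toNat + 8 * ((u.reg .rsi).toNat % 2 ^ 32)⟩] := id rfl

/-! ### `vorbis_init` -/

/-- **`vorbis_init(rdi = p, rsi = z)`** (CONTRACTS 73: "`Live(p,1808)`, `Live(z,16)`, the two disjoint; `mem64[z] = B`,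
`mem32[z+8] = arena_len` with `B % 8 = 0`, `0 < B`, `0 ≤ arena_len`, `B + arena_len ≤ 0xC00000`. Post H0: all 1808 bytes 0 except
`[p+112..128)` = the 16 bytes of `*z` with `[p+120] &= ~7` (= L), `[p+132] temp_offset = L`, `[p+1792] page_crc_tests = −1`.
Hence AR1, AR2, AR5 with S = 0, T = L, setups = temps = []"). Ghosts: the two words of `*z`, `B` and `len`; `L = len / 8 * 8`.
For the arena layer of the post (`ArenaOK.init`) the pre also asks AR1x (the arena in the data space, off the stack region) and
that no live object of `others` is an arena block or meets the arena (it is wholly poisoned at the start). The post is `H0`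
(Vorbis/State/Deinit.lean: every pointer NULL, every count 0) and the fresh arena: what `Real.P3` is made of, once
stb_vorbis_open_memory has stored the five stream fields (`H0.toH0s`, `ArenaOK.frame`). Footprint: `[p, p + 1808)`, 96 bytes of
stack (memset's 64 below its own 24 + 8); no shadow byte is written. -/
def vorbis_init.spec (others : List Obj) (frames : List (Nat × FrameLayout)) (B len : Nat) : Spec where
  pre u :=
    ShadowPre others frames u ∧
    LiveIn others frames (u.reg .rdi).toNat Off.sizeof.stb_vorbis ∧
    LiveIn others frames (u.reg .rsi).toNat Off.sizeof.stb_vorbis_alloc ∧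
    ((u.reg .rdi).toNat + Off.sizeof.stb_vorbis ≤ (u.reg .rsi).toNat ∨
      (u.reg .rsi).toNat + Off.sizeof.stb_vorbis_alloc ≤ (u.reg .rdi).toNat) ∧
    u.mem.u64 (u.reg .rsi).toNat = B ∧
    u.mem.u32 ((u.reg .rsi).toNat + 8) = len ∧
    (B % 8 = 0 ∧ 0 < B ∧ B + len / 8 * 8 ≤ 0xC00000) ∧
    (0x100000 ≤ B ∧ (B + len / 8 * 8 ≤ 0x700000 ∨ 0x800000 ≤ B)) ∧
    (∀ o, o ∈ others → o.kind ≠ .setup ∧ o.kind ≠ .temp ∧ (o.base + o.size ≤ B ∨ B + len / 8 * 8 ≤ o.base))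
  post u v :=
    H0 v.mem (u.reg .rdi).toNat ∧
    ArenaOK ⟨B, len / 8 * 8, 0, len / 8 * 8, [], []⟩ others v.mem (u.reg .rdi).toNat ∧
    ShadowUntouched u.mem v.mem
  frame := 96
  writes u := [⟨(u.reg .rdi).toNat, (u.reg .rdi).toNat + Off.sizeof.stb_vorbis⟩]

@[vspec] theorem vorbis_init.spec_frame (others : List Obj) (frames : List (Nat × FrameLayout)) (B len : Nat) :
    (vorbis_init.spec others frames B len).frame = 96 := id rfl

@[vspec] theorem vorbis_init.spec_writes (others : List Obj) (frames : List (Nat × FrameLayout)) (B len : Nat) (u : State) :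
    (vorbis_init.spec others frames B len).writes u =
      [⟨(u.reg .rdi).toNat, (u.reg .rdi).toNat + 1808⟩] := id rfl

/-! ### `vorbis_deinit`, `stb_vorbis_close` -/

/-- **`vorbis_deinit(rdi = p)`** (CONTRACTS 13: "PRE-D := OB1(p) ∧ H1 ∧ H2 ∧ H3 ∧ H4 ∧ H5, read on the VALUE of *p, every block
named being Live. SAME precondition in both contexts [the failing open on `&p`, stb_vorbis_close on the arena copy]. Returns; no
memory outside the stack below the entry rsp is written (H6: the function contains NO store instruction besides its 5 pushes).
Every invariant of the caller survives unchanged"): PRE-D is `DeinitOK Blk u.mem p` over a lawful block predicate whose blocks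
are live in the shadow invariant's live set. Ghost: `Blk`. Nothing is written but 96 bytes of stack (`writes = []`: with
`Returned.same`, the caller's memory is what it was); no shadow byte is written. ArenaOK is neither needed nor mentioned. -/
def vorbis_deinit.spec (others : List Obj) (frames : List (Nat × FrameLayout)) (Blk : Block → Prop) : Spec where
  pre u :=
    ShadowPre others frames u ∧
    BlkOK Blk ∧
    BlkLive Blk (Live (stackObjs frames ++ others)) ∧
    DeinitOK Blk u.mem (u.reg .rdi).toNat
  post u v :=
    ShadowUntouched u.mem v.mem
  frame := 96
  writes _ := []

@[vspec] theorem vorbis_deinit.spec_frame (others : List Obj) (frames : List (Nat × FrameLayout)) (Blk : Block → Prop) :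
    (vorbis_deinit.spec others frames Blk).frame = 96 := id rfl

@[vspec] theorem vorbis_deinit.spec_writes (others : List Obj) (frames : List (Nat × FrameLayout)) (Blk : Block → Prop)
    (u : State) : (vorbis_deinit.spec others frames Blk).writes u = [] := id rfl

/-- **`stb_vorbis_close(rdi = p)`** (CONTRACTS 14: "`p = 0`, or DeinitOK p — at its only call site (decode_all, success path)
`VorbisOK p` holds. Nothing changed"): NULL returns at once; otherwise `vorbis_deinit(p)`, then `setup_free(p, p)`. Nothing is
written but 112 bytes of stack; no shadow byte is written. -/
def stb_vorbis_close.spec (others : List Obj) (frames : List (Nat × FrameLayout)) (Blk : Block → Prop) : Spec where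
  pre u :=
    ShadowPre others frames u ∧
    (u.reg .rdi = 0 ∨
      (BlkOK Blk ∧
       BlkLive Blk (Live (stackObjs frames ++ others)) ∧
       DeinitOK Blk u.mem (u.reg .rdi).toNat))
  post u v :=
    ShadowUntouched u.mem v.mem
  frame := 112
  writes _ := []

@[vspec] theorem stb_vorbis_close.spec_frame (others : List Obj) (frames : List (Nat × FrameLayout)) (Blk : Block → Prop) :
    (stb_vorbis_close.spec others frames Blk).frame = 112 := id rfl

@[vspec] theorem stb_vorbis_close.spec_writes (others : List Obj) (frames : List (Nat × FrameLayout)) (Blk : Block → Prop)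
    (u : State) : (stb_vorbis_close.spec others frames Blk).writes u = [] := id rfl

/-! ### `stb_vorbis_get_error`, `stb_vorbis_get_file_offset`, `vorbis_validate`, `crc32_init` -/

/-- **`stb_vorbis_get_error(rdi = f)`** (CONTRACTS 15: "OB1. eax = old `[f+140]`; `[f+140] = 0`"): the 32-bit load zero-extends
into rax; the store to the same address is unchecked. Writes `[f + 140, f + 144)` and 32 bytes of stack; no shadow byte. -/
def stb_vorbis_get_error.spec (others : List Obj) (frames : List (Nat × FrameLayout)) : Spec where
  pre u :=
    ShadowPre others frames u ∧
    ObjLive others frames (u.reg .rdi).toNat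
  post u v :=
    (v.reg .rax).toNat = u.mem.readLE (u.reg .rdi + 140) 4 ∧
    v.mem.readLE (u.reg .rdi + 140) 4 = 0 ∧
    ShadowUntouched u.mem v.mem
  frame := 32
  writes u := [⟨(u.reg .rdi).toNat + Off.stb_vorbis.error, (u.reg .rdi).toNat + Off.stb_vorbis.error + 4⟩]

@[vspec] theorem stb_vorbis_get_error.spec_frame (others : List Obj) (frames : List (Nat × FrameLayout)) :
    (stb_vorbis_get_error.spec others frames).frame = 32 := id rfl

@[vspec] theorem stb_vorbis_get_error.spec_writes (others : List Obj) (frames : List (Nat × FrameLayout)) (u : State) :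
    (stb_vorbis_get_error.spec others frames).writes u =
      [⟨(u.reg .rdi).toNat + 140, (u.reg .rdi).toNat + 140 + 4⟩] := id rfl

/-- **`stb_vorbis_get_file_offset(rdi = f)`** (CONTRACTS 45: "OB1. eax = low 32 bits of `stream − stream_start` (value only; no
one indexes with it)"): two checked 8-byte loads (`f + 48`, `f + 56`), then `mov eax, ebp ; sub eax, [rbx + 0x38]`: the 32-bit
difference of the low half of `stream` and the DWORD at `f + 56` (little-endian: the low half of `stream_start`), zero-extended
into rax. Stated with the reads the code performs. Nothing is written but 48 bytes of stack; no shadow byte. -/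
def stb_vorbis_get_file_offset.spec (others : List Obj) (frames : List (Nat × FrameLayout)) : Spec where
  pre u :=
    ShadowPre others frames u ∧
    ObjLive others frames (u.reg .rdi).toNat
  post u v :=
    (v.reg .rax).toNat =
      (u.mem.readLE (u.reg .rdi + 48) 8 % 2 ^ 32 + 2 ^ 32 - u.mem.readLE (u.reg .rdi + 56) 4) % 2 ^ 32 ∧
    ShadowUntouched u.mem v.mem
  frame := 48
  writes _ := []

@[vspec] theorem stb_vorbis_get_file_offset.spec_frame (others : List Obj) (frames : List (Nat × FrameLayout)) :
    (stb_vorbis_get_file_offset.spec others frames).frame = 48 := id rfl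

@[vspec] theorem stb_vorbis_get_file_offset.spec_writes (others : List Obj) (frames : List (Nat × FrameLayout)) (u : State) :
    (stb_vorbis_get_file_offset.spec others frames).writes u = [] := id rfl

/-- **`vorbis_validate(rdi = data)`** (CONTRACTS 92: "`Live(data, 6)` (start_decoder's `header`, a 6-byte stack object of its
protected frame), SH5 (`vorbis.0` = (0x121600, 6)). eax ∈ {0,1}; no write"): `memcmp(data, vorbis, 6) == 0` (`test eax, eax ;
sete al ; movzx eax, al`): rax is 0 or 1. (Which of the two is decided by memcmp's post; no caller's safety depends on it: the
result only selects start_decoder's error return.) Nothing is written but 96 bytes of stack (memcmp's 80 below `sub rsp, 8` and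
the return address); no shadow byte. -/
def vorbis_validate.spec (others : List Obj) (frames : List (Nat × FrameLayout)) : Spec where
  pre u :=
    ShadowPre others frames u ∧
    LiveIn others frames (u.reg .rdi).toNat 6 ∧
    LiveIn others frames Vorbis.Globals.vorbis.beg Vorbis.Globals.vorbis.size
  post u v :=
    (v.reg .rax = 0 ∨ v.reg .rax = 1) ∧
    ShadowUntouched u.mem v.mem
  frame := 96
  writes _ := []

@[vspec] theorem vorbis_validate.spec_frame (others : List Obj) (frames : List (Nat × FrameLayout)) :
    (vorbis_validate.spec others frames).frame = 96 := id rfl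

@[vspec] theorem vorbis_validate.spec_writes (others : List Obj) (frames : List (Nat × FrameLayout)) (u : State) :
    (vorbis_validate.spec others frames).writes u = [] := id rfl

/-- **`crc32_init()`** (CONTRACTS 82: "SH5 (`crc_table` = (0x121c00, 1024) live). `crc_table[0..256)` written (values
irrelevant: no live function reads the table)"): 256 checked 4-byte stores. The only function whose footprint contains an image
address (SH7's exception): the bss object `crc_table`, above the text. 48 bytes of stack; no shadow byte. -/
def crc32_init.spec (others : List Obj) (frames : List (Nat × FrameLayout)) : Spec where
  pre u :=
    ShadowPre others frames u ∧
    LiveIn others frames Vorbis.Globals.crc_table.beg Vorbis.Globals.crc_table.size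
  post u v :=
    ShadowUntouched u.mem v.mem
  frame := 48
  writes _ := [⟨Vorbis.Globals.crc_table.beg, Vorbis.Globals.crc_table.beg + Vorbis.Globals.crc_table.size⟩]

@[vspec] theorem crc32_init.spec_frame (others : List Obj) (frames : List (Nat × FrameLayout)) :
    (crc32_init.spec others frames).frame = 48 := id rfl

@[vspec] theorem crc32_init.spec_writes (others : List Obj) (frames : List (Nat × FrameLayout)) (u : State) :
    (crc32_init.spec others frames).writes u = [⟨0x121c00, 0x121c00 + 1024⟩] := id rfl

/-! ### Lemmas: where a live block is; OB1 at the shadow level; the arena above the text -/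

/-- **Where a live block is**: in the data space, off the image's text, and off the stack below `top` (a stack object lies in an
active frame, at or above `top`; every other object is off the stack region). The bytewise analogue of `LiveIn.where_`. -/
theorem live_where {others : List Obj} {frames : List (Nat × FrameLayout)} {top : Nat} {mem : Mem} {B : Block}
    (hl : B.live (Live (stackObjs frames ++ others))) (hinv : ShadowInv others frames top mem)
    (hoff : ∀ o, o ∈ others → L.textHi ≤ o.base) (hs : 0 < B.size) (htop : 0x700000 < top) :
    0x119d40 ≤ B.base ∧ B.base + B.size ≤ 0xC00000 ∧
      (top ≤ B.base ∨ B.base + B.size ≤ 0x700000 ∨ 0x800000 ≤ B.base) := by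
  have hin := hl.inside hinv.shadow.covers hs
  have hbyte : ∀ x, B.base ≤ x → x < B.base + B.size →
      (top ≤ x ∨ x < 0x700000 ∨ 0x800000 ≤ x) ∧ (x = B.base → 0x119d40 ≤ x) := by
    intro x h1 h2
    have hx : Live (stackObjs frames ++ others) x := by
      have := hl (x - B.base) (by omega)
      have e : B.base + (x - B.base) = x := by omega
      rw [e] at this
      exact this
    obtain ⟨o, ho, hb⟩ := hx
    unfold Obj.Bytes at hb
    rcases List.mem_append.mp ho with hst | hoth
    · obtain ⟨bF, hbF, g1, g2⟩ := ShadowInv.stackObj_gran hinv.stack hst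
      obtain ⟨_, a8, atop, _, _⟩ := hinv.stack.active bF hbF
      have hlo := hinv.stack.lo
      have : o.gLo = o.base / 8 := rfl
      constructor
      · left
        omega
      · intro _
        omega
    · have h1 := hinv.off o hoth
      have h2 := hoff o hoth
      have e : L.textHi = 0x119d40 := rfl
      unfold OffStack at h1
      constructor
      · omega
      · intro _
        omega
  have h0 := hbyte B.base (Nat.le_refl _) (by omega)
  refine ⟨h0.2 rfl, hin.2, ?_⟩
  by_cases hc : top ≤ B.base ∨ B.base + B.size ≤ 0x700000 ∨ 0x800000 ≤ B.base
  · exact hc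
  · have hx := (hbyte (max B.base 0x700000) (by omega) (by omega)).1
    omega

/-- **The precondition of a 16-byte / N-byte check** (`__asan_load16_noabort`, `__asan_store16_noabort`: `check16Spec.pre` is
`Accessible mem rdi 16`) for bytes inside a live range — the range analogue of `LiveIn.accSmall` (vorbis_init's struct copy). -/
theorem _root_.Vorbis.LiveIn.accessible {others : List Obj} {frames : List (Nat × FrameLayout)} {top a n : Nat} {mem mem' : Mem}
    (h : LiveIn others frames a n) (hinv : ShadowInv others frames top mem) (hun : ShadowUntouched mem mem') (b k : Nat)
    (hk : 1 ≤ k) (h1 : a ≤ b) (h2 : b + k ≤ a + n) : Accessible mem' b k := by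
  have hl : (Block.mk a n).live (Live (stackObjs frames ++ others)) := by
    obtain ⟨o, ho, k1, k2⟩ := h
    unfold Block.live
    intro i hi
    refine ⟨o, ho, ?_⟩
    unfold Obj.Bytes
    simp only at hi ⊢
    omega
  have hinv' := hinv.untouched hun
  exact acc_of_obj_range hinv'.shadow.covers hl h1 h2 hk

namespace ObjLive
variable {others : List Obj} {frames : List (Nat × FrameLayout)} {f : Nat}

/-- From the pilot's form of OB1: `*f` lies inside ONE live object. -/
theorem of_liveIn (h : LiveIn others frames f Off.sizeof.stb_vorbis) : ObjLive others frames f := by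
  obtain ⟨o, ho, h1, h2⟩ := h
  unfold ObjLive Block.live
  intro i hi
  refine ⟨o, ho, ?_⟩
  unfold Obj.Bytes
  simp only [vblock] at hi ⊢
  omega

/-- From the invariant's form of OB1: `*f` is an allocated block, and allocated blocks are live. -/
theorem of_ob1 {Blk : Block → Prop} (hL : BlkLive Blk (Live (stackObjs frames ++ others))) (h : OB1 Blk f) :
    ObjLive others frames f :=
  hL _ h.blk

/-- One more live object (an allocation): `*f` stays live. -/
theorem cons (h : ObjLive others frames f) (o : Obj) : ObjLive (o :: others) frames f := by
  unfold ObjLive at h ⊢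
  refine h.mono ?_
  intro x hx
  obtain ⟨o', ho', hb⟩ := hx
  refine ⟨o', ?_, hb⟩
  rcases List.mem_append.mp ho' with h1 | h2
  · exact List.mem_append_left _ h1
  · exact List.mem_append_right _ (List.mem_cons_of_mem _ h2)

/-- Objects released (temp blocks): `*f` stays live if none of them holds a byte of it (`*f` is a stack object or a setup block;
`ArenaOK.block_tblock_disjoint`). The invariant's way to the same: `ObjLive.of_ob1` with `ArenaOK.blkLive` of the new arena. -/
theorem drop (h : ObjLive others frames f) (dead : List Obj)
    (hd : ∀ o, o ∈ dead → o.base + o.size ≤ f ∨ f + Off.sizeof.stb_vorbis ≤ o.base) :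
    ObjLive (dropObjs dead others) frames f := by
  unfold ObjLive at h ⊢
  rw [Block.live_iff] at h ⊢
  intro x hx
  obtain ⟨o', ho', hb⟩ := h x hx
  refine ⟨o', ?_, hb⟩
  rcases List.mem_append.mp ho' with h1 | h2
  · exact List.mem_append_left _ h1
  · apply List.mem_append_right
    rw [mem_dropObjs]
    refine ⟨h2, ?_⟩
    intro hdead
    have := hd o' hdead
    unfold Obj.Bytes at hb
    unfold Block.mem at hx
    simp only [vblock] at hx
    omega

/-- **A check site inside `*f`**: the `n` bytes at offset `off`. -/
theorem site (h : ObjLive others frames f) (off n : Nat) (hin : off + n ≤ Off.sizeof.stb_vorbis) (hn : 1 ≤ n) {a : Nat}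
    (ha : a = f + off) : Site (Live (stackObjs frames ++ others)) a n := by
  subst ha
  apply Site.of_block h
  · simp only [vblock]
    omega
  · simp only [vblock]
    omega
  · exact hn

/-- **A `check_<addr>` goal inside `*f`, K = 1, 2, 4, 8** (the analogue of `LiveIn.accSmall`): the `k` bytes at `b` lie inside the
1808 bytes of `*f`, and the memory at the check site has the shadow of the invariant's (`hun`: `by v_untouched`). -/
theorem accSmall {top : Nat} {mem mem' : Mem} (h : ObjLive others frames f) (hinv : ShadowInv others frames top mem)
    (hun : ShadowUntouched mem mem') (b : Word) (k : Nat) (hk : 1 ≤ k) (h1 : f ≤ b.toNat) (h2 : b.toNat + k ≤ f + 1808) :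
    AccSmall k mem' b := by
  have hinv' := hinv.untouched hun
  refine ⟨hinv'.sealed, acc_of_obj hinv'.shadow.covers h ?_ ?_ hk⟩
  · simp only [vblock]
    exact h1
  · simp only [vblock, voff]
    exact h2

/-- **Where `*f` is**, as one arithmetic fact for `u_omega`: in the data space, off the image's text, off the stack below `top`
(`top` = the function's entry rsp + 8; `0x700000 < top` is `AtEntry.room`). -/
theorem where_ {top : Nat} {mem : Mem} (h : ObjLive others frames f) (hinv : ShadowInv others frames top mem)
    (hoff : ∀ o, o ∈ others → L.textHi ≤ o.base) (htop : 0x700000 < top) :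
    0x119d40 ≤ f ∧ f + 1808 ≤ 0xC00000 ∧ (top ≤ f ∨ f + 1808 ≤ 0x700000 ∨ 0x800000 ≤ f) := by
  have := live_where h hinv hoff (by simp only [vblock, voff]; omega) htop
  simp only [vblock, voff] at this
  exact this

end ObjLive

/-- **FIX A's first test refuses only what does not fit**: a request above `INT_MAX − 7` (in particular every "negative" one,
read unsigned) does not fit in an arena that lies below C00000H. -/
theorem not_fits_of_big {A : Arena} {others : List Obj} {mem : Mem} {f : Nat} (h : ArenaOK A others mem f) (n : Nat)
    (hn : 0x7FFFFFF8 < n) : ¬ A.Fits n := by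
  have hb := h.bounds
  have := le_r8 n
  unfold Arena.Fits
  omega

/-- The windows of `*f` that EVERY allocator function leaves alone: everything except `setup_memory_required` `[8, 12)`
(`setup_malloc` adds the rounded size to it) and `setup_offset` / `temp_offset` `[128, 136)`. (FINDING: `objWins` of
Vorbis/Blocks.lean contains `[8, 12)`; no group of the invariant reads it.) -/
def allocWins : Wins := [(0, 8), (12, 128), (136, 1808)]

namespace ArenaPre
variable {A : Arena} {others : List Obj} {frames : List (Nat × FrameLayout)} {u : State}

/-- **The four loads of an allocator function, in the walker's form**: give them to the walk as facts (`have r1 := hpre.read_buffer`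
… before `u_walk`: a fact `u.mem.readLE a n = x` is a rewrite rule of every step), and every branch condition and stored value
speaks of the ghost numbers `A.B`, `A.L`, `A.S`, `A.T`. `mov r64, [f + 112]`: the buffer. -/
theorem read_buffer (h : ArenaPre A others frames u) : u.mem.readLE (u.reg .rdi + 112) 8 = A.B := by
  have := h.arena.u64_buffer
  rw [Mem.u64] at this
  rw [← this]
  exact readLE_field u.mem (u.reg .rdi) 112 8

/-- `mov r32, [f + 120]`: the length. -/
theorem read_length (h : ArenaPre A others frames u) : u.mem.readLE (u.reg .rdi + 120) 4 = A.L := by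
  have := h.arena.u32_length
  rw [Mem.u32] at this
  rw [← this]
  exact readLE_field u.mem (u.reg .rdi) 120 4

/-- `mov r32, [f + 128]`: `setup_offset`. -/
theorem read_setup (h : ArenaPre A others frames u) : u.mem.readLE (u.reg .rdi + 128) 4 = A.S := by
  have := h.arena.u32_setup
  rw [Mem.u32] at this
  rw [← this]
  exact readLE_field u.mem (u.reg .rdi) 128 4

/-- `mov r32, [f + 132]`: `temp_offset`. -/
theorem read_temp (h : ArenaPre A others frames u) : u.mem.readLE (u.reg .rdi + 132) 4 = A.T := by
  have := h.arena.u32_temp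
  rw [Mem.u32] at this
  rw [← this]
  exact readLE_field u.mem (u.reg .rdi) 132 4

/-- The new setup block lies above the image's text: `ShadowPre.offText` for the live list after `setup_malloc`. -/
theorem offText_setup (h : ArenaPre A others frames u) (n : Nat) :
    ∀ o, o ∈ A.newSetupObj n :: others → L.textHi ≤ o.base := by
  intro o ho
  rcases List.mem_cons.mp ho with rfl | ho
  · have := h.offText
    unfold Arena.newSetupObj Arena.setupObj
    simp only
    omega
  · exact h.shadow.offText o ho

/-- The new temp block lies above the image's text. -/
theorem offText_temp (h : ArenaPre A others frames u) (n : Nat) :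
    ∀ o, o ∈ A.newTempObj n :: others → L.textHi ≤ o.base := by
  intro o ho
  rcases List.mem_cons.mp ho with rfl | ho
  · have := h.offText
    unfold Arena.newTempObj Arena.tempObj
    simp only
    omega
  · exact h.shadow.offText o ho

/-- What is left after a release lies above the image's text. -/
theorem offText_drop (h : ArenaPre A others frames u) (dead : List Obj) :
    ∀ o, o ∈ dropObjs dead others → L.textHi ≤ o.base := by
  intro o ho
  exact h.shadow.offText o (mem_dropObjs.mp ho).1

end ArenaPre

/-! ### `setup_temp_free`: from the machine-level contract to the LIFO contract -/

/-- **The one call `setup_temp_free(f, values, 0)`** (start_decoder after a failed compute_codewords): with `sz = 0` nothing is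
poisoned, so the machine-level contract's post says that no shadow byte changed. -/
theorem setup_temp_free.weak_zero {others : List Obj} {frames : List (Nat × FrameLayout)} {u v : State}
    (hpost : (setup_temp_free.weakSpec others frames).post u v) (hz : (u.reg .rdx).toNat % 2 ^ 32 = 0) :
    ShadowUntouched u.mem v.mem := by
  obtain ⟨h0, h1⟩ := hpost
  by_cases hp : u.reg .rsi = 0
  · exact (h0 hp).1
  · obtain ⟨⟨m2, e1, e2⟩, _⟩ := h1 hp
    rw [hz] at e2
    have er : r8 0 = 0 := by decide
    rw [er, poisonMem_zero] at e2
    exact Mem.EqOn.trans e1 e2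

/-- **What the footprint of `setup_temp_free` leaves of the arena fields**: the 20 bytes `[f + 112, f + 132)` (`alloc_buffer`,
the length, `setup_offset`) read the same after the call. -/
theorem setup_temp_free.fields_same {others : List Obj} {frames : List (Nat × FrameLayout)} {u₀ u v : State} {ret : Word}
    (he : AtEntry (conv u₀) L.setup_temp_free.entry 48 ret u) (hsh : ShadowPre others frames u)
    (hobj : ObjLive others frames (u.reg .rdi).toNat)
    (hsame : Mem.SameExcept
      (⟨(u.reg .rsp).toNat - 48, (u.reg .rsp).toNat⟩ ::
        [⟨(u.reg .rdi).toNat + 132, (u.reg .rdi).toNat + 136⟩,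
         shadowSpan (u.reg .rsi).toNat ((u.reg .rsi).toNat + r8 ((u.reg .rdx).toNat % 2 ^ 32))]) u.mem v.mem) :
    Mem.EqOn ((u.reg .rdi).toNat + 112) ((u.reg .rdi).toNat + 132) u.mem v.mem := by
  have hroom := he.room
  have htop := he.top
  simp only [conv_stackLo, conv_stackHi] at hroom htop
  have hw := hobj.where_ hsh.inv hsh.offText (by omega)
  apply hsame.eqOn
  intro w hw'
  simp only [List.mem_cons, List.mem_nil_iff, or_false] at hw'
  rcases hw' with rfl | rfl | rfl
  · simp only
    omega
  · simp only
    omega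
  · unfold shadowSpan
    simp only
    omega

/-- **THE LIFO CONTRACT OF `setup_temp_free` FOLLOWS FROM ITS MACHINE-LEVEL CONTRACT** (CONTRACTS 88: "the LIFO contract is
the weak spec + the arena bookkeeping"): `ArenaOK.temp_free` + `ArenaOK.shadow_temp_free` + AR5 from the new `temp_offset`.
The unit `setup_temp_free` proves the machine-level contract; every caller's hypothesis about `setup_temp_free.spec` is
discharged with this. -/
theorem setup_temp_free.calls_of_weak {Lay : Layout} {μ : Microarch} {u₀ : State}
    (hw : ∀ (others : List Obj) (frames : List (Nat × FrameLayout)),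
      Calls Lay μ WayInv (conv u₀) L.setup_temp_free.entry (setup_temp_free.weakSpec others frames)) :
    ∀ (others : List Obj) (frames : List (Nat × FrameLayout)) (A : Arena) (m : Nat) (rest : List (Nat × Nat)),
      Calls Lay μ WayInv (conv u₀) L.setup_temp_free.entry (setup_temp_free.spec others frames A m rest) := by
  intro others frames A m rest u ret he hp
  obtain ⟨hpre, hcase⟩ := hp
  have hA := hpre.arena
  have h1 := hA.AR1
  have h1x := hA.AR1x
  have h2 := hA.AR2
  have hb := hA.bounds
  have hbuf : stb_vorbis.alloc.alloc_buffer u.mem (u.reg .rdi).toNat ≠ 0 := by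
    rw [hA.AR5.buffer]
    omega
  have hwcase : u.reg .rsi = 0 ∨
      ((u.reg .rsi).toNat % 8 = 0 ∧ 0x100000 ≤ (u.reg .rsi).toNat ∧
        (u.reg .rsi).toNat + r8 ((u.reg .rdx).toNat % 2 ^ 32) ≤ 0xC00000) := by
    rcases hcase with h0 | ⟨ht, hp, hsz, _⟩
    · exact Or.inl h0
    · right
      have htop := hA.top_eq_T ht
      rw [hp, hsz]
      omega
  have hwapart : u.reg .rsi = 0 ∨ r8 ((u.reg .rdx).toNat % 2 ^ 32) = 0 ∨
      (u.reg .rsi).toNat + r8 ((u.reg .rdx).toNat % 2 ^ 32) ≤ (u.reg .rdi).toNat + 132 ∨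
      (u.reg .rdi).toNat + 136 ≤ (u.reg .rsi).toNat := by
    rcases hcase with h0 | ⟨_, hp, hsz, hfree⟩
    · exact Or.inl h0
    · right
      right
      rw [hp, hsz]
      omega
  have he' : AtEntry (conv u₀) L.setup_temp_free.entry (setup_temp_free.weakSpec others frames).frame ret u := he
  refine (hw others frames u ret he' ⟨hpre.shadow, hpre.obj, hbuf, hwcase, hwapart⟩).mono ?_
  intro v hv
  have hsame : Mem.EqOn ((u.reg .rdi).toNat + 112) ((u.reg .rdi).toNat + 132) u.mem v.mem :=
    setup_temp_free.fields_same he hpre.shadow hpre.obj hv.same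
  have hroom := he.room
  simp only [conv_stackLo] at hroom
  have hwh := hpre.obj.where_ hpre.shadow.inv hpre.shadow.offText (by omega)
  have hf : (u.reg .rdi).toNat + Off.sizeof.stb_vorbis ≤ 2 ^ 64 := by
    simp only [voff]
    omega
  have hT := hA.u32_temp
  have hfield : ∀ mem : Mem, mem.readLE (u.reg .rdi + 132) 4 = mem.u32 ((u.reg .rdi).toNat + 132) := by
    intro mem
    rw [Mem.u32, ← addr_add_lit, addr_toNat]
  have hpost := hv.post
  simp only [setup_temp_free.weakSpec, hfield] at hpost
  refine ⟨hv.rip, hv.rsp, hv.saved, hv.same, hv.code, hv.inv, ?_, ?_⟩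
  · intro h0
    obtain ⟨hun, htemp⟩ := hpost.1 h0
    refine ⟨?_, hun⟩
    apply hA.move
    apply hA.AR5.set_temp hf A rfl rfl rfl
    · simp only [voff]
      exact hsame
    · simp only [vacc, voff]
      rw [Mem.i32_def, htemp, ← Mem.i32_def]
      have := hA.AR5.temp
      simp only [vacc, voff] at this
      exact this
  · intro hne
    rcases hcase with h0 | ⟨ht, hp, hsz, _⟩
    · exact absurd h0 hne
    · obtain ⟨⟨m2, e1, e2⟩, htemp⟩ := hpost.2 hne
      have htop := hA.top_eq_T ht
      constructor
      · apply hA.temp_free ht ((u.reg .rdx).toNat % 2 ^ 32) hsz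
        apply hA.AR5.set_temp hf (A.withTemp (A.T + r8 ((u.reg .rdx).toNat % 2 ^ 32) + 32) rest) rfl rfl rfl
        · simp only [voff]
          exact hsame
        · simp only [vacc, voff, varena]
          rw [Mem.i32_def, htemp, hT]
          have hlt : (A.T + r8 ((u.reg .rdx).toNat % 2 ^ 32) + 32) % 2 ^ 32 = A.T + r8 ((u.reg .rdx).toNat % 2 ^ 32) + 32 := by
            apply Nat.mod_eq_of_lt
            omega
          rw [hlt]
          have := sint32_cases (A.T + r8 ((u.reg .rdx).toNat % 2 ^ 32) + 32)
          omega
      · have s1 := hpre.shadow.inv.untouched e1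
        have s2 := hA.shadow_temp_free s1 ht ((u.reg .rdx).toNat % 2 ^ 32) hsz
        rw [← hp] at s2
        exact s2.untouched e2

/-! ### The tests of the two allocators, in the walker's form, decide `A.Fits` -/

/-- **`setup_malloc`: the three tests in the walker's form decide `A.Fits`** — FIX A's first test passed (`x ≤ INT_MAX − 7`
unsigned), the guard `T − S < sz` (a signed compare of the 32-bit difference) and the exact-fit test `S + r8 sz + 32 > T` (a
signed compare of `lea r15d, [r14 + r12 + 0x20]` with `temp_offset`) both not taken: the request fits. -/
theorem setup_malloc.fits_of_tests {A : Arena} (hb : A.S ≤ A.T ∧ A.T ≤ A.L ∧ A.L ≤ 0xB00000 ∧ A.B + A.L ≤ 0xC00000)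
    (x : BitVec 32) (h1 : x.toNat ≤ 0x7FFFFFF8)
    (hg : ¬ (BitVec.ofNat 32 A.T - BitVec.ofNat 32 A.S).toInt < x.toInt)
    (hx : ¬ (BitVec.ofNat 32 A.T).toInt <
      (BitVec.setWidth 32 (Word.ofBV (BitVec.ofNat 32 A.S) +
        Word.ofBV (BitVec.setWidth 32 (Word.ofBV x + 7).toBitVec &&& 4294967288#32) + 32).toBitVec).toInt) :
    A.Fits x.toNat := by
  have e1 : (BitVec.ofNat 32 A.T - BitVec.ofNat 32 A.S).toNat = A.T - A.S := toNat_sub32 A.T A.S hb.1 (by omega)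
  rw [toInt_of_lt (BitVec.ofNat 32 A.T - BitVec.ofNat 32 A.S) (by rw [e1]; omega), e1, toInt_of_lt x (by omega)] at hg
  have er := r8_lea x h1
  have hr := le_r8 x.toNat
  have hr2 := r8_lt x.toNat
  have e2 := toNat_lea32 (BitVec.ofNat 32 A.S) (BitVec.setWidth 32 (Word.ofBV x + 7).toBitVec &&& 4294967288#32)
  rw [er, toNat_ofNat32 A.S (by omega)] at e2
  have e3 : (A.S + r8 x.toNat + 32) % 2 ^ 32 = A.S + r8 x.toNat + 32 := Nat.mod_eq_of_lt (by omega)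
  rw [e3] at e2
  have eT := toNat_ofNat32 A.T (by omega)
  rw [toInt_of_lt (BitVec.ofNat 32 A.T) (by rw [eT]; omega), eT, toInt_of_lt _ (by rw [e2]; omega), e2] at hx
  unfold Arena.Fits
  omega

/-- `setup_malloc`: the guard taken ⇒ the request does not fit. -/
theorem setup_malloc.not_fits_of_guard {A : Arena} (hb : A.S ≤ A.T ∧ A.T ≤ A.L ∧ A.L ≤ 0xB00000 ∧ A.B + A.L ≤ 0xC00000)
    (x : BitVec 32) (h1 : x.toNat ≤ 0x7FFFFFF8)
    (hg : (BitVec.ofNat 32 A.T - BitVec.ofNat 32 A.S).toInt < x.toInt) : ¬ A.Fits x.toNat := by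
  have e1 : (BitVec.ofNat 32 A.T - BitVec.ofNat 32 A.S).toNat = A.T - A.S := toNat_sub32 A.T A.S hb.1 (by omega)
  rw [toInt_of_lt (BitVec.ofNat 32 A.T - BitVec.ofNat 32 A.S) (by rw [e1]; omega), e1, toInt_of_lt x (by omega)] at hg
  apply Arena.not_fits_of_guard
  omega

/-- `setup_malloc`: the guard not taken, the exact-fit test taken ⇒ the request does not fit. -/
theorem setup_malloc.not_fits_of_exact {A : Arena} (hb : A.S ≤ A.T ∧ A.T ≤ A.L ∧ A.L ≤ 0xB00000 ∧ A.B + A.L ≤ 0xC00000)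
    (x : BitVec 32) (h1 : x.toNat ≤ 0x7FFFFFF8)
    (hg : ¬ (BitVec.ofNat 32 A.T - BitVec.ofNat 32 A.S).toInt < x.toInt)
    (hx : (BitVec.ofNat 32 A.T).toInt <
      (BitVec.setWidth 32 (Word.ofBV (BitVec.ofNat 32 A.S) +
        Word.ofBV (BitVec.setWidth 32 (Word.ofBV x + 7).toBitVec &&& 4294967288#32) + 32).toBitVec).toInt) :
    ¬ A.Fits x.toNat := by
  have e1 : (BitVec.ofNat 32 A.T - BitVec.ofNat 32 A.S).toNat = A.T - A.S := toNat_sub32 A.T A.S hb.1 (by omega)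
  rw [toInt_of_lt (BitVec.ofNat 32 A.T - BitVec.ofNat 32 A.S) (by rw [e1]; omega), e1, toInt_of_lt x (by omega)] at hg
  have er := r8_lea x h1
  have hr := le_r8 x.toNat
  have hr2 := r8_lt x.toNat
  have e2 := toNat_lea32 (BitVec.ofNat 32 A.S) (BitVec.setWidth 32 (Word.ofBV x + 7).toBitVec &&& 4294967288#32)
  rw [er, toNat_ofNat32 A.S (by omega)] at e2
  have e3 : (A.S + r8 x.toNat + 32) % 2 ^ 32 = A.S + r8 x.toNat + 32 := Nat.mod_eq_of_lt (by omega)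
  rw [e3] at e2
  have eT := toNat_ofNat32 A.T (by omega)
  rw [toInt_of_lt (BitVec.ofNat 32 A.T) (by rw [eT]; omega), eT, toInt_of_lt _ (by rw [e2]; omega), e2] at hx
  unfold Arena.Fits
  omega

/-- The walker's form of `mov r15d, r14d ; sub r15d, r13d ; sub r15d, 0x1f` (`temp_offset − r8 sz − 31`, possibly negative), as an
integer: nothing wraps for numbers below 2^30. -/
theorem toInt_sub_sub31 (a : Nat) (y : BitVec 32) (ha : a < 2 ^ 30) (hy : y.toNat < 2 ^ 30) :
    (BitVec.ofNat 32 a - y - 31#32).toInt = (a : Int) - (y.toNat : Int) - 31 := by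
  have e1 : (BitVec.ofNat 32 a).toInt = (a : Int) := by
    rw [toInt_of_lt _ (by rw [toNat_ofNat32 a (by omega)]; omega), toNat_ofNat32 a (by omega)]
  have e2 : y.toInt = (y.toNat : Int) := toInt_of_lt y (by omega)
  have e3 : (31#32).toInt = 31 := by decide
  rw [BitVec.toInt_sub, BitVec.toInt_sub, e1, e2, e3]
  simp only [Int.bmod_def]
  omega

/-- **`setup_temp_malloc`: the three tests in the walker's form decide `A.Fits`** (`Arena.fits_iff_compiled`): FIX A's first
test passed, the guard not taken, and the compiled exact-fit test `T − r8 sz − 31 ≤ S` (`jle`) not taken: the request fits. -/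
theorem setup_temp_malloc.fits_of_tests {A : Arena} (hb : A.S ≤ A.T ∧ A.T ≤ A.L ∧ A.L ≤ 0xB00000 ∧ A.B + A.L ≤ 0xC00000)
    (x : BitVec 32) (h1 : x.toNat ≤ 0x7FFFFFF8)
    (hg : ¬ (BitVec.ofNat 32 A.T - BitVec.ofNat 32 A.S).toInt < x.toInt)
    (hx : ¬ (BitVec.ofNat 32 A.T - (BitVec.setWidth 32 (Word.ofBV x + 7).toBitVec &&& 4294967288#32) - 31#32).toInt ≤
      (BitVec.ofNat 32 A.S).toInt) : A.Fits x.toNat := by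
  have e1 : (BitVec.ofNat 32 A.T - BitVec.ofNat 32 A.S).toNat = A.T - A.S := toNat_sub32 A.T A.S hb.1 (by omega)
  rw [toInt_of_lt (BitVec.ofNat 32 A.T - BitVec.ofNat 32 A.S) (by rw [e1]; omega), e1, toInt_of_lt x (by omega)] at hg
  have er := r8_lea x h1
  have hr2 := r8_lt x.toNat
  have eS := toNat_ofNat32 A.S (by omega)
  rw [toInt_sub_sub31 A.T _ (by omega) (by rw [er]; omega), er,
    toInt_of_lt (BitVec.ofNat 32 A.S) (by rw [eS]; omega), eS] at hx
  rw [Arena.fits_iff_compiled]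
  omega

/-- `setup_temp_malloc`: the guard not taken, the compiled exact-fit test taken ⇒ the request does not fit. -/
theorem setup_temp_malloc.not_fits_of_exact {A : Arena}
    (hb : A.S ≤ A.T ∧ A.T ≤ A.L ∧ A.L ≤ 0xB00000 ∧ A.B + A.L ≤ 0xC00000) (x : BitVec 32) (h1 : x.toNat ≤ 0x7FFFFFF8)
    (hg : ¬ (BitVec.ofNat 32 A.T - BitVec.ofNat 32 A.S).toInt < x.toInt)
    (hx : (BitVec.ofNat 32 A.T - (BitVec.setWidth 32 (Word.ofBV x + 7).toBitVec &&& 4294967288#32) - 31#32).toInt ≤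
      (BitVec.ofNat 32 A.S).toInt) : ¬ A.Fits x.toNat := by
  have e1 : (BitVec.ofNat 32 A.T - BitVec.ofNat 32 A.S).toNat = A.T - A.S := toNat_sub32 A.T A.S hb.1 (by omega)
  rw [toInt_of_lt (BitVec.ofNat 32 A.T - BitVec.ofNat 32 A.S) (by rw [e1]; omega), e1, toInt_of_lt x (by omega)] at hg
  have er := r8_lea x h1
  have hr2 := r8_lt x.toNat
  have eS := toNat_ofNat32 A.S (by omega)
  rw [toInt_sub_sub31 A.T _ (by omega) (by rw [er]; omega), er,
    toInt_of_lt (BitVec.ofNat 32 A.S) (by rw [eS]; omega), eS] at hx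
  rw [Arena.fits_iff_compiled]
  omega

/-- `setup_temp_malloc`: the guard is the same instruction sequence as `setup_malloc`'s. -/
theorem setup_temp_malloc.not_fits_of_guard {A : Arena}
    (hb : A.S ≤ A.T ∧ A.T ≤ A.L ∧ A.L ≤ 0xB00000 ∧ A.B + A.L ≤ 0xC00000) (x : BitVec 32) (h1 : x.toNat ≤ 0x7FFFFFF8)
    (hg : (BitVec.ofNat 32 A.T - BitVec.ofNat 32 A.S).toInt < x.toInt) : ¬ A.Fits x.toNat :=
  setup_malloc.not_fits_of_guard hb x h1 hg

/-! ### What an allocator call leaves of `*f` (`ObjEq allocWins`: FRAME of every group of the invariant over an allocator call) -/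

/-- **What an allocator call leaves of `*f`** (the replacement of `ObjSame.of_sameExcept` for a footprint that contains
`setup_memory_required`): every span of the footprint lies in the stack below `top`, in the shadow, or inside `[f + 8, f + 12)` /
`[f + 128, f + 136)`. Turned into the windows a group asks for by `.sub (by decide)`. -/
theorem ObjLive.objEq_alloc {others : List Obj} {frames : List (Nat × FrameLayout)} {f top : Nat} {mem mem' : Mem}
    (h : ObjLive others frames f) (hinv : ShadowInv others frames top mem) (hoff : ∀ o, o ∈ others → L.textHi ≤ o.base)
    (htop : 0x700000 < top) {spans : List Span} (hs : Mem.SameExcept spans mem mem')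
    (hd : ∀ s, s ∈ spans → (0x700000 ≤ s.lo ∧ s.hi ≤ top) ∨ 0xC00000 ≤ s.lo ∨ (f + 8 ≤ s.lo ∧ s.hi ≤ f + 12) ∨
      (f + 128 ≤ s.lo ∧ s.hi ≤ f + 136)) : ObjEq allocWins mem f mem' f := by
  have hw := h.where_ hinv hoff htop
  have hhi := hinv.stack.hi
  apply ObjEq.of_sameExcept hs
  · intro w' hw'
    simp only [allocWins, List.mem_cons, List.mem_nil_iff, or_false] at hw'
    rcases hw' with rfl | rfl | rfl <;> simp only [] <;> omega
  · intro w' hw' s hsp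
    have := hd s hsp
    simp only [allocWins, List.mem_cons, List.mem_nil_iff, or_false] at hw'
    rcases hw' with rfl | rfl | rfl <;> simp only [] <;> omega

/-- **`*f` after `setup_malloc`**: everything but `setup_memory_required` and the two arena offsets reads the same. -/
theorem setup_malloc.objEq {others : List Obj} {frames : List (Nat × FrameLayout)} {A : Arena} {u₀ u v : State} {ret : Word}
    (he : AtEntry (conv u₀) L.setup_malloc.entry (setup_malloc.spec others frames A).frame ret u)
    (hpre : ArenaPre A others frames u) (hr : Returned (conv u₀) (setup_malloc.spec others frames A) u ret v) :
    ObjEq allocWins u.mem (u.reg .rdi).toNat v.mem (u.reg .rdi).toNat := by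
  have hroom := he.room
  simp only [vspec, conv_stackLo] at hroom
  apply hpre.obj.objEq_alloc hpre.shadow.inv hpre.shadow.offText (by omega) hr.same
  intro s hs
  simp only [Spec.footprint, vspec, List.mem_cons, List.mem_nil_iff, or_false] at hs
  rcases hs with rfl | rfl | rfl | rfl
  · left
    simp only
    omega
  · right
    right
    left
    simp only
    omega
  · right
    right
    right
    simp only
    omega
  · right
    left
    unfold shadowSpan
    simp only
    omega

/-- **`*f` after `vorbis_alloc`** (the object `&p`, before the struct copy). -/
theorem vorbis_alloc.objEq {others : List Obj} {frames : List (Nat × FrameLayout)} {A : Arena} {u₀ u v : State}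
    {ret : Word}
    (he : AtEntry (conv u₀) L.vorbis_alloc.entry (vorbis_alloc.spec others frames A).frame ret u)
    (hpre : ArenaPre A others frames u) (hr : Returned (conv u₀) (vorbis_alloc.spec others frames A) u ret v) :
    ObjEq allocWins u.mem (u.reg .rdi).toNat v.mem (u.reg .rdi).toNat := by
  have hroom := he.room
  simp only [vspec, conv_stackLo] at hroom
  apply hpre.obj.objEq_alloc hpre.shadow.inv hpre.shadow.offText (by omega) hr.same
  intro s hs
  simp only [Spec.footprint, vspec, List.mem_cons, List.mem_nil_iff, or_false] at hs
  rcases hs with rfl | rfl | rfl | rfl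
  · left
    simp only
    omega
  · right
    right
    left
    simp only
    omega
  · right
    right
    right
    simp only
    omega
  · right
    left
    unfold shadowSpan
    simp only
    omega

/-- **`*f` after `setup_temp_malloc`**: only `temp_offset` changed. -/
theorem setup_temp_malloc.objEq {others : List Obj} {frames : List (Nat × FrameLayout)} {A : Arena} {u₀ u v : State}
    {ret : Word}
    (he : AtEntry (conv u₀) L.setup_temp_malloc.entry (setup_temp_malloc.spec others frames A).frame ret u)
    (hpre : ArenaPre A others frames u) (hr : Returned (conv u₀) (setup_temp_malloc.spec others frames A) u ret v) :
    ObjEq allocWins u.mem (u.reg .rdi).toNat v.mem (u.reg .rdi).toNat := by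
  have hroom := he.room
  simp only [vspec, conv_stackLo] at hroom
  apply hpre.obj.objEq_alloc hpre.shadow.inv hpre.shadow.offText (by omega) hr.same
  intro s hs
  simp only [Spec.footprint, vspec, List.mem_cons, List.mem_nil_iff, or_false] at hs
  rcases hs with rfl | rfl | rfl
  · left
    simp only
    omega
  · right
    right
    right
    simp only
    omega
  · right
    left
    unfold shadowSpan
    simp only
    omega

/-- **`*f` after `arena_temp_restore`**: only `temp_offset` changed. -/
theorem arena_temp_restore.objEq {others : List Obj} {frames : List (Nat × FrameLayout)} {A : Arena}
    {dead keep : List (Nat × Nat)} {u₀ u v : State} {ret : Word}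
    (he : AtEntry (conv u₀) L.arena_temp_restore.entry (arena_temp_restore.spec others frames A dead keep).frame ret u)
    (hpre : ArenaPre A others frames u)
    (hr : Returned (conv u₀) (arena_temp_restore.spec others frames A dead keep) u ret v) :
    ObjEq allocWins u.mem (u.reg .rdi).toNat v.mem (u.reg .rdi).toNat := by
  have hroom := he.room
  simp only [vspec, conv_stackLo] at hroom
  apply hpre.obj.objEq_alloc hpre.shadow.inv hpre.shadow.offText (by omega) hr.same
  intro s hs
  simp only [Spec.footprint, vspec, List.mem_cons, List.mem_nil_iff, or_false] at hs
  rcases hs with rfl | rfl | rfl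
  · left
    simp only
    omega
  · right
    right
    right
    simp only
    omega
  · right
    left
    unfold shadowSpan
    simp only
    omega

/-- **`*f` after `setup_temp_free`** (either contract: the footprints are the same): only `temp_offset` changed. -/
theorem setup_temp_free.objEq {others : List Obj} {frames : List (Nat × FrameLayout)} {u₀ u v : State} {ret : Word}
    (he : AtEntry (conv u₀) L.setup_temp_free.entry (setup_temp_free.weakSpec others frames).frame ret u)
    (hsh : ShadowPre others frames u) (hobj : ObjLive others frames (u.reg .rdi).toNat)
    (hr : Returned (conv u₀) (setup_temp_free.weakSpec others frames) u ret v) :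
    ObjEq allocWins u.mem (u.reg .rdi).toNat v.mem (u.reg .rdi).toNat := by
  have hroom := he.room
  simp only [vspec, conv_stackLo] at hroom
  apply hobj.objEq_alloc hsh.inv hsh.offText (by omega) hr.same
  intro s hs
  simp only [Spec.footprint, vspec, List.mem_cons, List.mem_nil_iff, or_false] at hs
  rcases hs with rfl | rfl | rfl
  · left
    simp only
    omega
  · right
    right
    right
    simp only
    omega
  · right
    left
    unfold shadowSpan
    simp only
    omega

/-! ### `vorbis_deinit`: the assertions of its segments (design/units.tsv: vorbis_deinit.1 – .4, .COMPOSITION) -/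

namespace vorbis_deinit

/-- **The assertion at a cut point of `vorbis_deinit`** (CONTRACTS 13, segments: "entry: rbx = p; rsp = entry rsp − 40 (5 saved
registers above); r12 r13 r14 rbp dead; PRE-D"): the state `v` stands at the address `cut`, inside the call of `vorbis_deinit`
that was entered at the state `e` (return address `ret`) with the function's precondition. The prologue's five pushes are done
and nothing else has been stored (H6): the memory is the entry state's except below the entry rsp, the saved registers are in
their slots in push order (r14 r13 r12 rbp rbx), `rbx = p`, r15 was never touched. PRE-D is about the ENTRY memory (`pre`); in the
present memory it is `At.deinitOK`. One structure for the three cut points (`cut10`, `cut22`, `cut33` of Vorbis/Labels.lean): segment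
`k`'s exit assertion IS segment `k + 1`'s entry assertion. -/
structure At (cut : Word) (others : List Obj) (frames : List (Nat × FrameLayout)) (Blk : Block → Prop) (u₀ e : State)
    (ret : Word) (v : State) : Prop where
  /-- the function was entered at `e` … -/
  entry : AtEntry (conv u₀) L.vorbis_deinit.entry (vorbis_deinit.spec others frames Blk).frame ret e
  /-- … with its precondition -/
  pre : (vorbis_deinit.spec others frames Blk).pre e
  rip : v.rip = cut
  /-- five pushes below the return address -/
  rsp : v.reg .rsp = e.reg .rsp - 40
  /-- `mov rbx, rdi`: the object -/
  rbx : v.reg .rbx = e.reg .rdi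
  /-- r15 is not used by the function -/
  r15 : v.reg .r15 = e.reg .r15
  /-- the saved registers, in push order -/
  slot_r14 : v.mem.readLE (e.reg .rsp - 8) 8 = (e.reg .r14).toNat
  slot_r13 : v.mem.readLE (e.reg .rsp - 16) 8 = (e.reg .r13).toNat
  slot_r12 : v.mem.readLE (e.reg .rsp - 24) 8 = (e.reg .r12).toNat
  slot_rbp : v.mem.readLE (e.reg .rsp - 32) 8 = (e.reg .rbp).toNat
  slot_rbx : v.mem.readLE (e.reg .rsp - 40) 8 = (e.reg .rbx).toNat
  /-- H6: nothing was stored but below the entry rsp (the pushes, the callees' frames) -/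
  same : Mem.SameExcept [⟨(e.reg .rsp).toNat - 96, (e.reg .rsp).toNat⟩] e.mem v.mem
  code : (conv u₀).code.In v.mem
  inv : (conv u₀).inv v

/-- **Segment 1** (entry … `cut10`: prologue, vendor, the comment loop, comment_list, the residue_config walk): from the function's
entry with its precondition to the first cut point. -/
def Seg1 (Lay : Layout) (μ : Microarch) (u₀ : State) : Prop :=
  ∀ (others : List Obj) (frames : List (Nat × FrameLayout)) (Blk : Block → Prop) (e : State) (ret : Word),
    AtEntry (conv u₀) L.vorbis_deinit.entry (vorbis_deinit.spec others frames Blk).frame ret e →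
    (vorbis_deinit.spec others frames Blk).pre e →
    ReachVia Lay μ WayInv e (At L.vorbis_deinit.cut10 others frames Blk u₀ e ret)

/-- **Segment 2** (`cut10` … `cut22`: the codebooks walk, codebooks, floor_config, residue_config, the mapping walk, mapping). -/
def Seg2 (Lay : Layout) (μ : Microarch) (u₀ : State) : Prop :=
  ∀ (others : List Obj) (frames : List (Nat × FrameLayout)) (Blk : Block → Prop) (e : State) (ret : Word) (v : State),
    At L.vorbis_deinit.cut10 others frames Blk u₀ e ret v →
    ReachVia Lay μ WayInv v (At L.vorbis_deinit.cut22 others frames Blk u₀ e ret)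

/-- **Segment 3** (`cut22` … `cut33`: the per-channel pointers with the machine clamp `i ≤ 15`, the five `[2]` arrays). -/
def Seg3 (Lay : Layout) (μ : Microarch) (u₀ : State) : Prop :=
  ∀ (others : List Obj) (frames : List (Nat × FrameLayout)) (Blk : Block → Prop) (e : State) (ret : Word) (v : State),
    At L.vorbis_deinit.cut22 others frames Blk u₀ e ret v →
    ReachVia Lay μ WayInv v (At L.vorbis_deinit.cut33 others frames Blk u₀ e ret)

/-- **Segment 4** (`cut33` … `ret`: the epilogue `pop rbx rbp r12 r13 r14 ; ret`): to the function's `Returned`. -/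
def Seg4 (Lay : Layout) (μ : Microarch) (u₀ : State) : Prop :=
  ∀ (others : List Obj) (frames : List (Nat × FrameLayout)) (Blk : Block → Prop) (e : State) (ret : Word) (v : State),
    At L.vorbis_deinit.cut33 others frames Blk u₀ e ret v →
    ReachVia Lay μ WayInv v (Returned (conv u₀) (vorbis_deinit.spec others frames Blk) e ret)

/-- **The composition of `vorbis_deinit`**: the four segments chain into the function's contract. -/
theorem compose {Lay : Layout} {μ : Microarch} {u₀ : State} (h1 : Seg1 Lay μ u₀) (h2 : Seg2 Lay μ u₀) (h3 : Seg3 Lay μ u₀)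
    (h4 : Seg4 Lay μ u₀) :
    ∀ (others : List Obj) (frames : List (Nat × FrameLayout)) (Blk : Block → Prop),
      Calls Lay μ WayInv (conv u₀) L.vorbis_deinit.entry (vorbis_deinit.spec others frames Blk) := by
  intro others frames Blk e ret he hp
  refine (h1 others frames Blk e ret he hp).trans ?_
  intro v hv
  refine (h2 others frames Blk e ret v hv).trans ?_
  intro w hw
  refine (h3 others frames Blk e ret w hw).trans ?_
  intro x hx
  exact h4 others frames Blk e ret x hx

namespace At
variable {cut : Word} {others : List Obj} {frames : List (Nat × FrameLayout)} {Blk : Block → Prop} {u₀ e v : State}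
  {ret : Word}

/-- The stack pointer at a cut point, as a number. -/
theorem rsp_toNat (h : At cut others frames Blk u₀ e ret v) : (v.reg .rsp).toNat = (e.reg .rsp).toNat - 40 := by
  have hroom := h.entry.room
  simp only [vspec, conv_stackLo] at hroom
  rw [h.rsp]
  have hle : (40 : Word) ≤ e.reg .rsp := by
    rw [UInt64.le_iff_toNat_le]
    have : (40 : Word).toNat = 40 := rfl
    omega
  rw [UInt64.toNat_sub_of_le _ _ hle]
  rfl

/-- The return address is still on the stack, at the entry rsp (what the `ret` of segment 4 pops). -/
theorem retAddr (h : At cut others frames Blk u₀ e ret v) : UInt64.ofNat (v.mem.readLE (e.reg .rsp) 8) = ret := by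
  have htop := h.entry.top
  simp only [conv_stackHi] at htop
  rw [h.same.readLE (e.reg .rsp) 8 (by omega) ?_]
  · exact h.entry.retAddr
  · intro w hw
    have e1 : w = ⟨(e.reg .rsp).toNat - 96, (e.reg .rsp).toNat⟩ := List.mem_singleton.mp hw
    subst e1
    simp only
    omega

/-- No shadow byte has been written since the entry. -/
theorem untouched (h : At cut others frames Blk u₀ e ret v) : ShadowUntouched e.mem v.mem := by
  have htop := h.entry.top
  simp only [conv_stackHi] at htop
  unfold ShadowUntouched
  apply h.same.eqOn
  intro w hw
  have e1 : w = ⟨(e.reg .rsp).toNat - 96, (e.reg .rsp).toNat⟩ := List.mem_singleton.mp hw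
  subst e1
  simp only
  omega

/-- **The shadow layer at a cut point**: same objects, same frames; the clean stack ends at the present stack pointer. -/
theorem shadow (h : At cut others frames Blk u₀ e ret v) : ShadowInv others frames (v.reg .rsp).toNat v.mem := by
  have hroom := h.entry.room
  have hal := h.entry.align
  simp only [vspec, conv_stackLo] at hroom
  have hinv := h.pre.1.inv.untouched h.untouched
  rw [h.rsp_toNat]
  exact hinv.lower (by omega) (by omega) (by omega)

/-- **Every allocated block reads as at the entry** (H6 + every live byte is off the stack below the entry rsp). -/
theorem allKept (h : At cut others frames Blk u₀ e ret v) : AllKept Blk e.mem v.mem := by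
  obtain ⟨hsh, hok, hlive, _⟩ := h.pre
  have hroom := h.entry.room
  have htop := h.entry.top
  simp only [vspec, conv_stackLo] at hroom
  simp only [conv_stackHi] at htop
  intro B hB
  by_cases hz : B.size = 0
  · refine ⟨?_, hok.no_wrap hB⟩
    simp only [vblock]
    intro a h1 h2
    omega
  · apply Block.Kept.of_sameExcept h.same ?_ (hok.no_wrap hB)
    intro w hw
    have e1 : w = ⟨(e.reg .rsp).toNat - 96, (e.reg .rsp).toNat⟩ := List.mem_singleton.mp hw
    subst e1
    simp only
    have := live_where (hlive B hB) hsh.inv hsh.offText (by omega) (by omega)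
    omega

/-- **PRE-D in the present memory**: what every check site of the segment is justified with (`DeinitOK.site_…`, `OB1.site`). -/
theorem deinitOK (h : At cut others frames Blk u₀ e ret v) : DeinitOK Blk v.mem (v.reg .rbx).toNat := by
  rw [h.rbx]
  exact h.pre.2.2.2.agree h.allKept

end At

end vorbis_deinit

end Vorbis.Spec
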